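-- pv_equiv track=rewrite | github.com/lPitecus/100-days-of-code | D001-D014_Python-Beginner/thonny/plate.py | first_number_zero
-- ===== SOURCE A (Python) =====
-- numbers = ["0", "1", "2", "3", "4", "5", "6", "7", "8", "9"]
--
-- def first_number_zero(s):
--     index = 0
--     for char in s:
--         if char == "0":
--             for char in s[0:index]:
--                 if char in numbers:
--                     return True
--                 else:
--                     pass
--             return False
--         else:
--             pass
--         index += 1
--     return True
-- ===== SOURCE B (Python) =====
-- numbers = ["0", "1", "2", "3", "4", "5", "6", "7", "8", "9"]
--
-- def first_number_zero(s):
--     for char in s: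
--         if char in numbers:
--             return char != "0"
--     return True
-- ===== Notes on version B (the rewrite author's own statement) =====
-- stated objective: simpler
-- what changed: B replaces A's find-first-zero-then-rescan-the-prefix logic (with its explicit index counter and slice) by a single stop-at-first-digit pass: the answer is whether the first digit, if any, is nonzero.
import Mathlib
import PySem

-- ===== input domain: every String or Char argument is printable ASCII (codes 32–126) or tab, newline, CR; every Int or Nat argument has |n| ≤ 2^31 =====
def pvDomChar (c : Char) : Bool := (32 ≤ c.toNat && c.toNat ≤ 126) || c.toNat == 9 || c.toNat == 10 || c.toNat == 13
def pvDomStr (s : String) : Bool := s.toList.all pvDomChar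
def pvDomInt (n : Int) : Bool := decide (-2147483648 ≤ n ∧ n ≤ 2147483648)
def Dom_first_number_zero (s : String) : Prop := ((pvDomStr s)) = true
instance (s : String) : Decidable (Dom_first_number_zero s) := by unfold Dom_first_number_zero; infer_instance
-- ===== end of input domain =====

-- B: a single stop-at-first-digit pass replaces A's find-zero-then-rescan-prefix logic (objective: simpler).
-- ===== PORT A =====
def pvNumbers : List Char := ['0','1','2','3','4','5','6','7','8','9']

-- inner loop: 'for char in s[0:index]: if char in numbers: return True'; falls through to 'return False'
def fnzInner : List Char → Bool
  | [] => false
  | c :: t => if c ∈ pvNumbers then true else fnzInner t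

-- outer loop: 'rest' is the part of the string still to scan, 'index' the counter, 'full' the whole string
def fnzOuter (full : List Char) : List Char → Int → Bool
  | [], _ => true
  | c :: t, index =>
    if c = '0' then fnzInner (PySem.List.slice full (some 0) (some index))
    else fnzOuter full t (index + 1)

def first_number_zero (s : String) : Bool := fnzOuter s.toList s.toList 0

-- ===== PORT B =====
def fnzAltGo : List Char → Bool
  | [] => true
  | c :: t => if c ∈ pvNumbers then decide (c ≠ '0') else fnzAltGo t

def first_number_zero_alt (s : String) : Bool := fnzAltGo s.toList

-- ===== PRECONDITION & SPEC =====
def Spec_first_number_zero (s : String) (out : Bool) : Prop := out = first_number_zero_alt s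
instance (s : String) (out : Bool) : Decidable (Spec_first_number_zero s out) := by unfold Spec_first_number_zero; infer_instance

-- ===== CLAIM (what is proved, stated in full; the proofs are below) =====
def Claim_equal_first_number_zero : Prop := ∀ (s : String), Dom_first_number_zero s → Spec_first_number_zero s (first_number_zero s)

-- ===== LEMMAS AND PROOFS =====
theorem fnzInner_append (a b : List Char) :
    fnzInner (a ++ b) = (fnzInner a || fnzInner b) := by
  induction a with
  | nil => simp [fnzInner]
  | cons c t ih => by_cases h : c ∈ pvNumbers <;> simp [fnzInner, h, ih]

-- loop invariant: with 'pre' the already-scanned zero-free prefix, A's outer loop on the rest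
-- computes 'any digit in the prefix OR B's verdict on the rest'
theorem fnzOuter_invariant (rest pre : List Char) (hpre : ∀ c ∈ pre, c ≠ '0') :
    fnzOuter (pre ++ rest) rest (pre.length : Int) = (fnzInner pre || fnzAltGo rest) := by
  induction rest generalizing pre with
  | nil => simp [fnzOuter, fnzAltGo]
  | cons c t ih =>
    by_cases h0 : c = '0'
    · subst h0
      have hs : PySem.List.slice (pre ++ '0' :: t) (some 0) (some (pre.length : Int)) = pre := by
        simp [PySem.List.slice_to_natCast]
      simp [fnzOuter, hs, fnzAltGo, pvNumbers]
    · have hpre' : ∀ c' ∈ pre ++ [c], c' ≠ '0' := by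
        intro c' hc'
        rcases List.mem_append.mp hc' with h | h
        · exact hpre c' h
        · simp at h; simpa [h] using h0
      have := ih (pre ++ [c]) hpre'
      simp only [List.append_assoc, List.singleton_append, List.length_append,
        List.length_singleton] at this
      have hcast : ((pre.length + 1 : Nat) : Int) = (pre.length : Int) + 1 := by push_cast; ring
      rw [hcast] at this
      by_cases hd : c ∈ pvNumbers
      · have hne : decide (c ≠ '0') = true := by simpa using h0
        simp [fnzOuter, h0, this, fnzInner_append, fnzInner, hd, fnzAltGo]
      · simp [fnzOuter, h0, this, fnzInner_append, fnzInner, hd, fnzAltGo]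

-- ===== VERDICT (by name: the statement is the Claim_ definition above) =====
theorem first_number_zero_spec : Claim_equal_first_number_zero := by
  intro s _
  unfold Spec_first_number_zero first_number_zero first_number_zero_alt
  have := fnzOuter_invariant s.toList [] (by simp)
  simpa [fnzInner] using this
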